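-- pv_equiv track=rewrite | github.com/Jooty/po-minibot | src/utils.py | group_nearby_positions
-- ===== SOURCE A (Python) =====
-- def group_nearby_positions(positions, max_distance=25):
--     """Group nearby positions and return their centers."""
--     if not positions:
--         return []
--
--     merged = []
--     current_group = [positions[0]]
--
--     for i in range(1, len(positions)):
--         curr_x = positions[i][0]
--         prev_x = current_group[-1][0]
--
--         if curr_x - prev_x <= max_distance:
--             current_group.append(positions[i])
--         else:
--             center_x = sum(pos[0] for pos in current_group) // len(current_group)
--             center_y = current_group[0][1]  # Assume same Y for horizontal grouping
--             merged.append((center_x, center_y))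
--             current_group = [positions[i]]
--
--     # Don't forget the last group
--     if current_group:
--         center_x = sum(pos[0] for pos in current_group) // len(current_group)
--         center_y = current_group[0][1]
--         merged.append((center_x, center_y))
--
--     return merged
-- ===== SOURCE B (Python) =====
-- def group_nearby_positions(positions, max_distance=25):
--     """Partition positions into runs (new run when adjacent x-gap exceeds
--     max_distance), then map each run to its center."""
--     def split(ps):
--         if not ps:
--             return []
--         i = 1
--         while i < len(ps) and ps[i][0] - ps[i - 1][0] <= max_distance:
--             i += 1
--         return [ps[:i]] + split(ps[i:])
--
--     def center(g):
--         return (sum(p[0] for p in g) // len(g), g[0][1])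
--
--     return [center(g) for g in split(positions)]
-- ===== Notes on version B (the rewrite author's own statement) =====
-- stated objective: simpler
-- what changed: Replaced A's single fused loop with running group/merged state by a two-phase decomposition: a recursive partition of the positions into runs (split at adjacent x-gaps > max_distance) followed by a comprehension mapping each run to its center.
import Mathlib
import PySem

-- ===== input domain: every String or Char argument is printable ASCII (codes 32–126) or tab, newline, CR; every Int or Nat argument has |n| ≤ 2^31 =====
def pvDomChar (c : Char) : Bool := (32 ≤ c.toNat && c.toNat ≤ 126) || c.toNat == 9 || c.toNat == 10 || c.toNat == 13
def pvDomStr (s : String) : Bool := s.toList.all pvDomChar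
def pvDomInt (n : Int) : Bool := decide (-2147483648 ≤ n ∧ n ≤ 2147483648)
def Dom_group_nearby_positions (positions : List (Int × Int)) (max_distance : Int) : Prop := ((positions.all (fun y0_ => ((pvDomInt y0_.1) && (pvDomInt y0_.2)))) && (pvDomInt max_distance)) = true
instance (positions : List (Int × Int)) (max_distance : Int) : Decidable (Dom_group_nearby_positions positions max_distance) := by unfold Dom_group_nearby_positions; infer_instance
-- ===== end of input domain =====

-- B splits the fused loop of A into an explicit partition-into-runs pass followed by a
-- per-run center computation (objective: simpler decomposition; same cost).

-- ===== PORT A =====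
-- center of a group: (sum of x's // len, y of first element); group is never empty in A
def gnpCenter (g : List (Int × Int)) : Int × Int :=
  (PySem.Int.floordiv (g.foldl (fun s p => s + p.1) 0) g.length, (g.headD (0, 0)).2)

-- the for-loop of A: rest = remaining positions, cur = current_group, merged = merged
def gnpLoopA (md : Int) (rest : List (Int × Int)) (cur : List (Int × Int))
    (merged : List (Int × Int)) : List (Int × Int) :=
  match rest with
  | [] => if cur ≠ [] then merged ++ [gnpCenter cur] else merged
  | p :: rs =>
    if p.1 - ((cur.getLast?).getD (0, 0)).1 ≤ md then
      gnpLoopA md rs (cur ++ [p]) merged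
    else
      gnpLoopA md rs [p] (merged ++ [gnpCenter cur])

def group_nearby_positions (positions : List (Int × Int)) (max_distance : Int) : List (Int × Int) :=
  match positions with
  | [] => []
  | p :: rs => gnpLoopA max_distance rs [p] []

-- ===== PORT B =====
-- the while-loop of B's split: extends the run as long as the adjacent gap is ≤ md;
-- returns (run after prev, remaining positions)
def gnpRun (md : Int) (prev : Int × Int) : List (Int × Int) → List (Int × Int) × List (Int × Int)
  | [] => ([], [])
  | p :: rest =>
    if p.1 - prev.1 ≤ md then
      let (g, r) := gnpRun md p rest
      (p :: g, r)
    else ([], p :: rest)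

theorem gnpRun_snd_length (md : Int) (prev : Int × Int) (l : List (Int × Int)) :
    (gnpRun md prev l).2.length ≤ l.length := by
  induction l generalizing prev with
  | nil => simp [gnpRun]
  | cons p rest ih =>
    simp only [gnpRun]
    split
    · simpa using le_trans (ih p) (Nat.le_succ _)
    · simp

def gnpSplit (md : Int) : List (Int × Int) → List (List (Int × Int))
  | [] => []
  | p :: rest =>
    let gr := gnpRun md p rest
    (p :: gr.1) :: gnpSplit md gr.2
  termination_by l => l.length
  decreasing_by
    simpa using Nat.lt_succ_of_le (gnpRun_snd_length md p rest)

def group_nearby_positions_alt (positions : List (Int × Int)) (max_distance : Int) : List (Int × Int) :=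
  (gnpSplit max_distance positions).map gnpCenter

-- ===== PRECONDITION & SPEC =====
def Spec_group_nearby_positions (positions : List (Int × Int)) (max_distance : Int) (out : List (Int × Int)) : Prop := out = group_nearby_positions_alt positions max_distance
instance (positions : List (Int × Int)) (max_distance : Int) (out : List (Int × Int)) : Decidable (Spec_group_nearby_positions positions max_distance out) := by unfold Spec_group_nearby_positions; infer_instance

-- ===== CLAIM (what is proved, stated in full; the proofs are below) =====
def Claim_equal_group_nearby_positions : Prop := ∀ (positions : List (Int × Int)) (max_distance : Int), Dom_group_nearby_positions positions max_distance → Spec_group_nearby_positions positions max_distance (group_nearby_positions positions max_distance)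

-- ===== LEMMAS AND PROOFS =====

-- main invariant: A's loop equals "finish the current run, then split the rest"
theorem gnpLoopA_eq (md : Int) (rest : List (Int × Int)) :
    ∀ (cur merged : List (Int × Int)), cur ≠ [] →
    gnpLoopA md rest cur merged =
      merged ++ gnpCenter (cur ++ (gnpRun md ((cur.getLast?).getD (0, 0)) rest).1) ::
        (gnpSplit md (gnpRun md ((cur.getLast?).getD (0, 0)) rest).2).map gnpCenter := by
  induction rest with
  | nil =>
    intro cur merged hcur
    simp [gnpLoopA, gnpRun, gnpSplit, hcur]
  | cons p rs ih =>
    intro cur merged hcur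
    simp only [gnpLoopA, gnpRun]
    by_cases hle : p.1 - ((cur.getLast?).getD (0, 0)).1 ≤ md
    · rw [if_pos hle, if_pos hle]
      have hne : cur ++ [p] ≠ [] := by simp
      have hl2 : ((cur ++ [p]).getLast?).getD (0, 0) = p := by simp
      rw [ih (cur ++ [p]) merged hne, hl2]
      cases hgr : gnpRun md p rs with
      | mk g r => simp [List.append_assoc]
    · rw [if_neg hle, if_neg hle]
      have hne : ([p] : List (Int × Int)) ≠ [] := by simp
      rw [ih [p] (merged ++ [gnpCenter cur]) hne]
      have hl1 : (([p] : List (Int × Int)).getLast?).getD (0, 0) = p := by simp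
      rw [hl1]
      cases hgr : gnpRun md p rs with
      | mk g r =>
        rw [gnpSplit]
        simp [hgr, List.append_assoc]

-- ===== VERDICT (by name: the statement is the Claim_ definition above) =====
theorem group_nearby_positions_spec : Claim_equal_group_nearby_positions := by
  intro positions md _
  unfold Spec_group_nearby_positions
  cases positions with
  | nil => simp [group_nearby_positions, group_nearby_positions_alt, gnpSplit]
  | cons p rs =>
    have hne : ([p] : List (Int × Int)) ≠ [] := by simp
    show gnpLoopA md rs [p] [] = group_nearby_positions_alt (p :: rs) md
    rw [gnpLoopA_eq md rs [p] [] hne]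
    have hl : (([p] : List (Int × Int)).getLast?).getD (0, 0) = p := by simp
    rw [hl]
    unfold group_nearby_positions_alt
    rw [gnpSplit]
    cases hgr : gnpRun md p rs with
    | mk g r => simp
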